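-- pv_equiv track=rewrite | github.com/Damian3ro/advent-of-code-2023 | scripts/Day1/day1_part2_script.py | get_numbers_list
-- ===== SOURCE A (Python) =====
-- def extract_digit_positions_in_one_line(line):
--     digits_numbers = ['0', '1', '2', '3', '4', '5', '6', '7', '8', '9']
--     digits_positions = []
--     for char in line:
--         if digits_numbers.count(char) != 0:
--             first_index = line.find(char)
--             digits_positions.append(line.find(char))
--
--             last_index = line.rfind(char, first_index)
--             if first_index != last_index:
--                 digits_positions.append(last_index)
--     return digits_positions
--
-- def extract_digit_string_positions_in_one_line(line):
--     digits_strings_one_digit = ['one', 'two', 'three', 'four', 'five', 'six', 'seven', 'eight', 'nine']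
--     digits_string_positions = []
--     digits_string_found = []
--     for number_string in digits_strings_one_digit:
--         if number_string in line:
--             first_index = line.find(number_string)
--             digits_string_positions.append(first_index)
--             digits_string_found.append(str(digits_strings_one_digit.index(number_string) + 1))
--
--             last_index = line.rfind(number_string, first_index)
--             if first_index != last_index:
--                 digits_string_positions.append(last_index)
--                 digits_string_found.append(str(digits_strings_one_digit.index(number_string) + 1))
--     return digits_string_positions, digits_string_found
--
-- def get_numbers_list(lines_list):
--     numbers_list = []
--     for line in lines_list:
--         digit_int_positions = extract_digit_positions_in_one_line(line)
--         digit_string_positions, digit_strings = extract_digit_string_positions_in_one_line(line)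
--         first_digit = 0
--         second_digit = 0
--         if len(digit_int_positions) >= 1 and len(digit_string_positions) >= 1:
--             if digit_int_positions[0] > min(digit_string_positions):
--                 first_digit = digit_strings[digit_string_positions.index(min(digit_string_positions))]
--             else:
--                 first_digit = line[digit_int_positions[0]]
--
--             if digit_int_positions[len(digit_int_positions) - 1] < max(digit_string_positions):
--                 second_digit = digit_strings[digit_string_positions.index(max(digit_string_positions))]
--             else:
--                 second_digit = line[digit_int_positions[len(digit_int_positions) - 1]]
--         elif len(digit_int_positions) == 0 and len(digit_string_positions) > 0:
--             first_digit = digit_strings[digit_string_positions.index(min(digit_string_positions))]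
--             second_digit = digit_strings[digit_string_positions.index(max(digit_string_positions))]
--         elif len(digit_string_positions) == 0 and len(digit_int_positions) > 0:
--             first_digit = line[digit_int_positions[0]]
--             second_digit = line[digit_int_positions[len(digit_int_positions) - 1]]
--         numbers_list.append(int(first_digit + second_digit))
--     return numbers_list
-- ===== SOURCE B (Python) =====
-- # B: one left-to-right scan per line (index-by-index match of a digit char or a
-- # spelled-out word) instead of A's find/rfind + min/max/index bookkeeping; simpler.
-- _WORDS = [("one", 1), ("two", 2), ("three", 3), ("four", 4), ("five", 5),
--           ("six", 6), ("seven", 7), ("eight", 8), ("nine", 9)]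
--
-- def _match_at(line, i):
--     ch = line[i]
--     if '0' <= ch <= '9':
--         return ord(ch) - 48
--     for w, d in _WORDS:
--         if line[i:i + len(w)] == w:
--             return d
--     return None
--
-- def _line_value(line):
--     vals = [v for v in (_match_at(line, i) for i in range(len(line))) if v is not None]
--     return 10 * vals[0] + vals[-1] if vals else 0
--
-- def get_numbers_list(lines_list):
--     return [_line_value(line) for line in lines_list]
-- ===== Notes on version B (the rewrite author's own statement) =====
-- stated objective: simpler
-- what changed: A builds per line two position lists with find/rfind per digit char and per spelled word, then recombines them with min/max/.index bookkeeping; B makes one left-to-right scan matching a digit char or a word at each index and takes the first and last match.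
import Mathlib
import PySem

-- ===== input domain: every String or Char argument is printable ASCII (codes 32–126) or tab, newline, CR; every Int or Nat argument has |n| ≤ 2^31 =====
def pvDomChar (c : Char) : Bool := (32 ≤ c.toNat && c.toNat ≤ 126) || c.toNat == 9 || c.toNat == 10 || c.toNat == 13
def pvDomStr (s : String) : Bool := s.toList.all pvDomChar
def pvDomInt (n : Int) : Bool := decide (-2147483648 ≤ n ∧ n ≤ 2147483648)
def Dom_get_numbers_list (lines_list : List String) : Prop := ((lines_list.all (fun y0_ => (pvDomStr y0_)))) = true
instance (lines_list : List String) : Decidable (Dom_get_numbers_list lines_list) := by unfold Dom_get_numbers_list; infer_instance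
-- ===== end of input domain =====

-- B replaces A's per-line find/rfind + min/max/index bookkeeping by a single
-- left-to-right scan matching a digit char or spelled-out word at each index (objective: simpler).


-- ===== PORT A =====
def pvDigitsA : List Char := ['0','1','2','3','4','5','6','7','8','9']
def pvWordsA : List String := ["one","two","three","four","five","six","seven","eight","nine"]

def extract_digit_positions_in_one_line (line : String) : List Int :=
  line.toList.foldl (fun acc ch =>
    if PySem.List.count pvDigitsA ch ≠ 0 then
      let fi := PySem.Chars.find line.toList [ch]
      let li := PySem.Chars.rfindFrom line.toList [ch] fi
      if fi ≠ li then (acc ++ [fi]) ++ [li] else acc ++ [fi]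
    else acc) []

-- str(digits_strings_one_digit.index(number_string) + 1); .index never raises here (w ∈ list)
def pvDigitWordStr (w : String) : String :=
  PySem.Int.toStr ((((PySem.List.index? pvWordsA w).getD 0 + 1 : Nat) : Int))

def extract_digit_string_positions_in_one_line (line : String) : List Int × List String :=
  pvWordsA.foldl (fun acc w =>
    if PySem.Str.isIn w line then
      let fi := PySem.Str.find line w
      let li := PySem.Str.rfindFrom line w fi
      if fi ≠ li then ((acc.1 ++ [fi]) ++ [li], (acc.2 ++ [pvDigitWordStr w]) ++ [pvDigitWordStr w])
      else (acc.1 ++ [fi], acc.2 ++ [pvDigitWordStr w])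
    else acc) ([], [])

-- loop body of A's get_numbers_list (the Python computes first_digit/second_digit, then int(first+second));
-- the .getD defaults are unreachable (guarded by the length tests, Python never raises there)
def pvLineA (line : String) : Int :=
  let dip := extract_digit_positions_in_one_line line
  let dsp := (extract_digit_string_positions_in_one_line line).1
  let ds  := (extract_digit_string_positions_in_one_line line).2
  if dip.length ≥ 1 ∧ dsp.length ≥ 1 then
    let fd : String :=
      if (PySem.List.pyGet? dip 0).getD 0 > ((PySem.List.min? dsp (fun x => x)).getD 0) then
        (PySem.List.pyGet? ds (((PySem.List.index? dsp ((PySem.List.min? dsp (fun x => x)).getD 0)).getD 0 : Nat) : Int)).getD ""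
      else
        String.ofList [(PySem.Str.pyGet? line ((PySem.List.pyGet? dip 0).getD 0)).getD ' ']
    let sd : String :=
      if (PySem.List.pyGet? dip ((dip.length : Int) - 1)).getD 0 < ((PySem.List.max? dsp (fun x => x)).getD 0) then
        (PySem.List.pyGet? ds (((PySem.List.index? dsp ((PySem.List.max? dsp (fun x => x)).getD 0)).getD 0 : Nat) : Int)).getD ""
      else
        String.ofList [(PySem.Str.pyGet? line ((PySem.List.pyGet? dip ((dip.length : Int) - 1)).getD 0)).getD ' ']
    (PySem.Int.ofChars? (fd.toList ++ sd.toList)).getD 0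
  else if dip.length = 0 ∧ dsp.length > 0 then
    let fd := (PySem.List.pyGet? ds (((PySem.List.index? dsp ((PySem.List.min? dsp (fun x => x)).getD 0)).getD 0 : Nat) : Int)).getD ""
    let sd := (PySem.List.pyGet? ds (((PySem.List.index? dsp ((PySem.List.max? dsp (fun x => x)).getD 0)).getD 0 : Nat) : Int)).getD ""
    (PySem.Int.ofChars? (fd.toList ++ sd.toList)).getD 0
  else if dsp.length = 0 ∧ dip.length > 0 then
    let fd := String.ofList [(PySem.Str.pyGet? line ((PySem.List.pyGet? dip 0).getD 0)).getD ' ']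
    let sd := String.ofList [(PySem.Str.pyGet? line ((PySem.List.pyGet? dip ((dip.length : Int) - 1)).getD 0)).getD ' ']
    (PySem.Int.ofChars? (fd.toList ++ sd.toList)).getD 0
  else 0

def get_numbers_list (lines_list : List String) : List Int :=
  lines_list.foldl (fun nums line => nums ++ [pvLineA line]) []

-- ===== PORT B =====
def pvWordsB : List (String × Int) :=
  [("one",1),("two",2),("three",3),("four",4),("five",5),("six",6),("seven",7),("eight",8),("nine",9)]

def pvMatchAt (line : String) (i : Nat) : Option Int :=
  match PySem.Str.pyGet? line (i : Int) with
  | none => none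
  | some ch =>
    if '0' ≤ ch ∧ ch ≤ '9' then some ((ch.toNat : Int) - 48)
    else pvWordsB.findSome? (fun wd =>
      if PySem.List.slice line.toList (some (i : Int)) (some ((i : Int) + (wd.1.toList.length : Int))) = wd.1.toList
      then some wd.2 else none)

def pvLineValue (line : String) : Int :=
  let vals := (List.range line.toList.length).filterMap (pvMatchAt line)
  match vals with
  | [] => 0
  | v :: rest => 10 * v + rest.getLastD v

def get_numbers_list_alt (lines_list : List String) : List Int :=
  lines_list.map pvLineValue

-- ===== PRECONDITION & SPEC =====
def Spec_get_numbers_list (lines_list : List String) (out : List Int) : Prop := out = get_numbers_list_alt lines_list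
instance (lines_list : List String) (out : List Int) : Decidable (Spec_get_numbers_list lines_list out) := by unfold Spec_get_numbers_list; infer_instance

-- ===== CLAIM (what is proved, stated in full; the proofs are below) =====
def Claim_equal_get_numbers_list : Prop := ∀ (lines_list : List String), Dom_get_numbers_list lines_list → Spec_get_numbers_list lines_list (get_numbers_list lines_list)


def pvIsDig (c : Char) : Bool := 48 ≤ c.toNat && c.toNat ≤ 57

theorem pvMem_digitsA {c : Char} : c ∈ pvDigitsA ↔ pvIsDig c = true := by
  constructor
  · intro h; fin_cases h <;> decide
  · intro h
    simp only [pvIsDig, Bool.and_eq_true, decide_eq_true_eq] at h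
    obtain ⟨h1, h2⟩ := h
    have hc := Char.ofNat_toNat c
    interval_cases hk : c.toNat <;> (rw [← hc]; decide)

theorem pvCount_digits (c : Char) : (PySem.List.count pvDigitsA c ≠ 0) ↔ pvIsDig c = true := by
  rw [← pvMem_digitsA]
  have : PySem.List.count pvDigitsA c = List.count c pvDigitsA := by
    simp [PySem.List.count]
  rw [this]
  constructor
  · intro h; exact List.count_pos_iff.mp (by omega)
  · intro h; have := List.count_pos_iff.mpr h; omega

theorem pvLe_digit (c : Char) : ('0' ≤ c ∧ c ≤ '9') ↔ pvIsDig c = true := by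
  simp [pvIsDig, Char.le_def, UInt32.le_iff_toNat_le]

theorem pvOfChars_two {a b : Char} (ha : pvIsDig a = true) (hb : pvIsDig b = true) :
    PySem.Int.ofChars? [a, b] = some (10 * ((a.toNat : Int) - 48) + ((b.toNat : Int) - 48)) := by
  have ha' := pvMem_digitsA.mpr ha
  have hb' := pvMem_digitsA.mpr hb
  fin_cases ha' <;> fin_cases hb' <;> decide
theorem pvSingle_prefix {s : List Char} {c : Char} {j : Nat} :
    [c] <+: s.drop j ↔ s[j]? = some c := by
  rw [← List.head?_drop]
  cases s.drop j with
  | nil => simp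
  | cons a t => simp [List.cons_prefix_cons, eq_comm]

theorem pvFind_spec_nat {s sub : List Char} {p : Nat}
    (hocc : sub <+: s.drop p) :
    ∃ k : Nat, PySem.Chars.find s sub = (k : Int) ∧ k ≤ p ∧ sub <+: s.drop k ∧
      ∀ j < k, ¬ sub <+: s.drop j := by
  have hinf : PySem.Chars.isIn sub s = true := by
    rw [← PySem.Chars.exists_prefix_drop_iff_isIn]
    exact ⟨p, hocc⟩
  have hinf2 : sub <:+: s := (PySem.Chars.isIn_iff_infix (sub := sub) (s := s)).mp hinf
  have hnn : 0 ≤ PySem.Chars.find s sub := by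
    rw [PySem.Chars.find_nonneg_iff]; exact hinf2
  obtain ⟨h1, h2⟩ := PySem.Chars.find_spec hnn
  refine ⟨(PySem.Chars.find s sub).toNat, by omega, ?_, h1, h2⟩
  by_contra h
  exact h2 p (by omega) hocc

theorem pvRfindFrom_nat (s sub : List Char) (st : Nat) (hst : st ≤ s.length) :
    PySem.Chars.rfindFrom s sub (st : Int) none =
      (if PySem.Chars.rfind (s.drop st) sub = -1 then -1
       else (st : Int) + PySem.Chars.rfind (s.drop st) sub) := by
  unfold PySem.Chars.rfindFrom
  have h2 : ¬ ((st : Int) < 0) := by omega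
  have h1 : ¬ ((s.length : Int) < (st : Int)) := by exact_mod_cast not_lt.mpr (by exact_mod_cast hst)
  simp [h1, h2, Int.toNat_natCast]

theorem pvRfind_go_spec (s sub : List Char) (m : Nat) :
    (PySem.Chars.rfind.go s sub m = -1 ∧ ∀ j ≤ m, ¬ sub <+: s.drop j) ∨
    (∃ j : Nat, j ≤ m ∧ PySem.Chars.rfind.go s sub m = (j : Int) ∧ sub <+: s.drop j ∧
      ∀ j', j < j' → j' ≤ m → ¬ sub <+: s.drop j') := by
  induction m with
  | zero =>
    by_cases h : sub.isPrefixOf s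
    · right
      refine ⟨0, le_refl 0, ?_, ?_, by omega⟩
      · simp [PySem.Chars.rfind.go, h]
      · simpa [List.isPrefixOf_iff_prefix] using h
    · left
      constructor
      · simp [PySem.Chars.rfind.go, h]
      · intro j hj; interval_cases j
        simpa [List.isPrefixOf_iff_prefix] using h
  | succ n ih =>
    by_cases h : sub.isPrefixOf (s.drop (n + 1))
    · right
      refine ⟨n + 1, le_refl _, ?_, ?_, by omega⟩
      · simp [PySem.Chars.rfind.go, h]
      · simpa [List.isPrefixOf_iff_prefix] using h
    · have hgo : PySem.Chars.rfind.go s sub (n + 1) = PySem.Chars.rfind.go s sub n := by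
        simp [PySem.Chars.rfind.go, h]
      have hnp : ¬ sub <+: s.drop (n + 1) := by
        simpa [List.isPrefixOf_iff_prefix] using h
      rcases ih with ⟨he, hall⟩ | ⟨j, hj, he, hp, hmax⟩
      · left
        refine ⟨by rw [hgo]; exact he, ?_⟩
        intro j hj
        rcases Nat.lt_or_ge j (n + 1) with h' | h'
        · exact hall j (by omega)
        · have : j = n + 1 := by omega
          rw [this]; exact hnp
      · right
        refine ⟨j, by omega, by rw [hgo]; exact he, hp, ?_⟩
        intro j' h1 h2
        rcases Nat.lt_or_ge j' (n + 1) with h' | h'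
        · exact hmax j' h1 (by omega)
        · have : j' = n + 1 := by omega
          rw [this]; exact hnp

theorem pvRfind_spec {s sub : List Char} (hsub : sub ≠ []) :
    (PySem.Chars.rfind s sub = -1 ∧ ∀ j, ¬ sub <+: s.drop j) ∨
    (∃ j : Nat, PySem.Chars.rfind s sub = (j : Int) ∧ sub <+: s.drop j ∧
      ∀ j', j < j' → ¬ sub <+: s.drop j') := by
  have hbig : ∀ j, s.length < j → ¬ sub <+: s.drop j := by
    intro j hj hp
    rw [List.drop_eq_nil_of_le (by omega)] at hp
    exact hsub (List.prefix_nil.mp hp)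
  rcases pvRfind_go_spec s sub s.length with ⟨he, hall⟩ | ⟨j, hj, he, hp, hmax⟩
  · left
    refine ⟨he, fun j => ?_⟩
    rcases Nat.lt_or_ge s.length j with h | h
    · exact hbig j h
    · exact hall j h
  · right
    refine ⟨j, he, hp, fun j' h1 => ?_⟩
    rcases Nat.lt_or_ge s.length j' with h | h
    · exact hbig j' h
    · exact hmax j' h1 h

theorem pvRfindFrom_spec {s sub : List Char} {st p : Nat} (hsub : sub ≠ [])
    (hocc : sub <+: s.drop p) (hstp : st ≤ p) :
    ∃ q : Nat, PySem.Chars.rfindFrom s sub (st : Int) none = (q : Int) ∧ st ≤ q ∧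
      sub <+: s.drop q ∧ ∀ j, q < j → ¬ sub <+: s.drop j := by
  have hpn : p < s.length := by
    by_contra h
    rw [List.drop_eq_nil_of_le (by omega)] at hocc
    exact hsub (List.prefix_nil.mp hocc)
  have hocc' : sub <+: (s.drop st).drop (p - st) := by
    rw [List.drop_drop]
    have : st + (p - st) = p := by omega
    rw [this]; exact hocc
  rcases pvRfind_spec (s := s.drop st) (sub := sub) hsub with ⟨_, hall⟩ | ⟨j, he, hp', hmax⟩
  · exact absurd hocc' (hall (p - st))
  · refine ⟨st + j, ?_, by omega, ?_, ?_⟩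
    · rw [pvRfindFrom_nat s sub st (by omega), he]
      rw [if_neg (by omega)]
      push_cast; ring
    · rw [List.drop_drop] at hp'; exact hp'
    · intro j' hj'
      have := hmax (j' - st) (by omega)
      rw [List.drop_drop] at this
      have heq : st + (j' - st) = j' := by omega
      rw [heq] at this; exact this

-- generic: head?/getLast? of a flatMap, first hit of findSome?
theorem pvHead?_flatMap {α β : Type} (l : List α) (g : α → List β) :
    (l.flatMap g).head? = l.findSome? (fun a => (g a).head?) := by
  induction l with
  | nil => simp
  | cons a t ih =>
    rw [List.flatMap_cons, List.head?_append, ih, List.findSome?_cons]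
    cases h : (g a).head? <;> simp [h]

theorem pvFindSome?_first {α β : Type} (l : List α) (f : α → Option β) (p : Nat) (x : α)
    (hx : l[p]? = some x) (hbefore : ∀ j < p, ∀ y, l[j]? = some y → f y = none)
    (hsome : (f x).isSome = true) : l.findSome? f = f x := by
  induction l generalizing p with
  | nil => simp at hx
  | cons a t ih =>
    cases p with
    | zero =>
      simp only [List.getElem?_cons_zero, Option.some.injEq] at hx
      subst hx
      rw [List.findSome?_cons]
      cases h : f a with
      | none => rw [h] at hsome; simp at hsome
      | some b => rfl
    | succ n =>
      have ha : f a = none := hbefore 0 (by omega) a (by simp)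
      rw [List.findSome?_cons, ha]
      exact ih n (by simpa using hx) (fun j hj y hy => hbefore (j + 1) (by omega) y (by simpa using hy))

theorem pvGetLast?_flatMap {α β : Type} (l : List α) (g : α → List β) :
    (l.flatMap g).getLast? = l.reverse.findSome? (fun a => (g a).getLast?) := by
  rw [List.getLast?_eq_head?_reverse, List.reverse_flatMap, pvHead?_flatMap]
  have : (fun a => ((List.reverse ∘ g) a).head?) = fun a => (g a).getLast? := by
    funext a
    rw [Function.comp_apply, ← List.getLast?_eq_head?_reverse]
  rw [this]

def pvGd (line : String) (ch : Char) : List Int :=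
  if pvIsDig ch then
    if PySem.Chars.find line.toList [ch] ≠
        PySem.Chars.rfindFrom line.toList [ch] (PySem.Chars.find line.toList [ch]) then
      [PySem.Chars.find line.toList [ch],
        PySem.Chars.rfindFrom line.toList [ch] (PySem.Chars.find line.toList [ch])]
    else [PySem.Chars.find line.toList [ch]]
  else []

theorem pvDip_eq (line : String) :
    extract_digit_positions_in_one_line line = line.toList.flatMap (pvGd line) := by
  unfold extract_digit_positions_in_one_line
  refine Eq.trans (PySem.List.foldl_congr_mem _ _ (fun acc ch => acc ++ pvGd line ch) _ ?_) ?_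
  · intro acc ch _
    by_cases h : pvIsDig ch = true
    · have hc : PySem.List.count pvDigitsA ch ≠ 0 := (pvCount_digits ch).mpr h
      rw [if_pos hc]
      simp only [pvGd, h, if_true]
      split <;> simp
    · have hc : ¬ (PySem.List.count pvDigitsA ch ≠ 0) := fun hx => h ((pvCount_digits ch).mp hx)
      rw [if_neg hc]
      simp [pvGd, h]
  · rw [PySem.List.foldl_append_eq_flatMap]
    simp

-- decide facts about the word tables
theorem pvWord_head : ∀ w ∈ pvWordsA, w.toList ≠ [] ∧ pvIsDig (w.toList.headD ' ') = false := by
  decide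

theorem pvWord_prefix_uniq : ∀ u ∈ pvWordsA, ∀ v ∈ pvWordsA, u.toList <+: v.toList → u = v := by
  decide

theorem pvWordsA_eq_mapB : pvWordsA = pvWordsB.map Prod.fst := by decide

theorem pvWordsB_fst_inj : ∀ wd ∈ pvWordsB, ∀ wd' ∈ pvWordsB, wd.1 = wd'.1 → wd = wd' := by
  decide

theorem pvWordstr_spec : ∀ wd ∈ pvWordsB,
    (pvDigitWordStr wd.1).toList = [Char.ofNat (48 + wd.2.toNat)] ∧
    pvIsDig (Char.ofNat (48 + wd.2.toNat)) = true ∧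
    (((Char.ofNat (48 + wd.2.toNat)).toNat : Int) - 48) = wd.2 := by
  decide

theorem pvWord_at_uniq {u v : String} (hu : u ∈ pvWordsA) (hv : v ∈ pvWordsA)
    {t : List Char} (h1 : u.toList <+: t) (h2 : v.toList <+: t) : u = v := by
  rcases List.prefix_or_prefix_of_prefix h1 h2 with h | h
  · exact pvWord_prefix_uniq u hu v hv h
  · exact (pvWord_prefix_uniq v hv u hu h).symm

def pvGw (line : String) (w : String) : List (Int × String) :=
  if PySem.Str.isIn w line then
    if PySem.Str.find line w ≠ PySem.Str.rfindFrom line w (PySem.Str.find line w) then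
      [(PySem.Str.find line w, pvDigitWordStr w),
        (PySem.Str.rfindFrom line w (PySem.Str.find line w), pvDigitWordStr w)]
    else [(PySem.Str.find line w, pvDigitWordStr w)]
  else []

def pvP (line : String) : List (Int × String) := pvWordsA.flatMap (pvGw line)

theorem pvWords_foldl (line : String) (ws : List String) (ps : List Int) (ds : List String) :
    ws.foldl (fun acc w =>
      if PySem.Str.isIn w line then
        let fi := PySem.Str.find line w
        let li := PySem.Str.rfindFrom line w fi
        if fi ≠ li then ((acc.1 ++ [fi]) ++ [li], (acc.2 ++ [pvDigitWordStr w]) ++ [pvDigitWordStr w])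
        else (acc.1 ++ [fi], acc.2 ++ [pvDigitWordStr w])
      else acc) (ps, ds) =
    (ps ++ (ws.flatMap (pvGw line)).map Prod.fst, ds ++ (ws.flatMap (pvGw line)).map Prod.snd) := by
  induction ws generalizing ps ds with
  | nil => simp
  | cons w t ih =>
    rw [List.foldl_cons, List.flatMap_cons]
    by_cases h : PySem.Str.isIn w line = true
    · rw [if_pos h]
      show List.foldl _ (if _ ≠ _ then _ else _) t = _
      unfold pvGw
      rw [if_pos h]
      by_cases h2 : PySem.Str.find line w ≠ PySem.Str.rfindFrom line w (PySem.Str.find line w)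
      · rw [if_pos h2, if_pos h2, ih]
        simp only [List.map_append, List.map_cons, List.map_nil, List.append_assoc,
          List.cons_append, List.nil_append]
        rfl
      · rw [if_neg h2, if_neg h2, ih]
        simp only [List.map_append, List.map_cons, List.map_nil, List.append_assoc,
          List.cons_append, List.nil_append]
        rfl
    · rw [if_neg h]
      have hg : pvGw line w = [] := by rw [pvGw, if_neg h]
      rw [ih]
      simp only [List.flatMap_cons, hg, List.nil_append]

theorem pvDsp_eq (line : String) :
    extract_digit_string_positions_in_one_line line =
      ((pvP line).map Prod.fst, (pvP line).map Prod.snd) := by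
  unfold extract_digit_string_positions_in_one_line pvP
  rw [pvWords_foldl]
  simp

-- index predicates (Bool) on a line
def pvDigB (s : List Char) (i : Nat) : Bool := (s[i]?.map pvIsDig).getD false
def pvWordB (s : List Char) (i : Nat) : Bool := pvWordsA.any (fun w => w.toList.isPrefixOf (s.drop i))
def pvHitB (s : List Char) (i : Nat) : Bool := pvDigB s i || pvWordB s i

theorem pvDigB_iff {s : List Char} {i : Nat} :
    pvDigB s i = true ↔ ∃ c, s[i]? = some c ∧ pvIsDig c = true := by
  unfold pvDigB
  cases h : s[i]? <;> simp [h]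

theorem pvWordB_iff {s : List Char} {i : Nat} :
    pvWordB s i = true ↔ ∃ w ∈ pvWordsA, w.toList <+: s.drop i := by
  unfold pvWordB
  simp [List.any_eq_true, List.isPrefixOf_iff_prefix]

theorem pvDigB_lt {s : List Char} {i : Nat} (h : pvDigB s i = true) : i < s.length := by
  obtain ⟨c, hc, -⟩ := pvDigB_iff.mp h
  exact (List.getElem?_eq_some_iff.mp hc).1

theorem pvWordB_lt {s : List Char} {i : Nat} (h : pvWordB s i = true) : i < s.length := by
  obtain ⟨w, hw, hp⟩ := pvWordB_iff.mp h
  obtain ⟨hne, -⟩ := pvWord_head w hw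
  by_contra hn
  rw [List.drop_eq_nil_of_le (by omega)] at hp
  exact hne (List.prefix_nil.mp hp)

theorem pvHitB_lt {s : List Char} {i : Nat} (h : pvHitB s i = true) : i < s.length := by
  rcases Bool.or_eq_true_iff.mp h with h | h
  · exact pvDigB_lt h
  · exact pvWordB_lt h

theorem pvWordB_not_dig {s : List Char} {i : Nat} (h : pvWordB s i = true) :
    pvDigB s i = false := by
  obtain ⟨w, hw, hp⟩ := pvWordB_iff.mp h
  obtain ⟨hne, hhd⟩ := pvWord_head w hw
  cases hwl : w.toList with
  | nil => exact absurd hwl hne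
  | cons a t =>
    rw [hwl] at hp
    have h1 : [a] <+: s.drop i := List.IsPrefix.trans ⟨t, rfl⟩ hp
    have h2 : s[i]? = some a := pvSingle_prefix.mp h1
    rw [hwl] at hhd
    simp only [List.headD_cons] at hhd
    simp [pvDigB, h2, hhd]

theorem pvMatchAt_of_get {line : String} {i : Nat} {c : Char}
    (hc : line.toList[i]? = some c) :
    pvMatchAt line i =
      (if '0' ≤ c ∧ c ≤ '9' then some ((c.toNat : Int) - 48)
       else pvWordsB.findSome? (fun wd =>
        if PySem.List.slice line.toList (some (i : Int)) (some ((i : Int) + (wd.1.toList.length : Int))) = wd.1.toList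
        then some wd.2 else none)) := by
  unfold pvMatchAt
  rw [PySem.Str.pyGet?_natCast, hc]

-- pvMatchAt characterizations
theorem pvSliceTest_iff {s : List Char} {i : Nat} (w : List Char) :
    (PySem.List.slice s (some (i : Int)) (some ((i : Int) + (w.length : Int))) = w)
      ↔ w <+: s.drop i := by
  rw [PySem.List.slice_natCast_add]
  rw [List.prefix_iff_eq_take]
  exact eq_comm

theorem pvMatchAt_dig {line : String} {i : Nat} {c : Char}
    (hc : line.toList[i]? = some c) (hd : pvIsDig c = true) :
    pvMatchAt line i = some ((c.toNat : Int) - 48) := by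
  rw [pvMatchAt_of_get hc]
  rw [if_pos ((pvLe_digit c).mpr hd)]

theorem pvMatchAt_word {line : String} {i : Nat} {c : Char} {wd : String × Int}
    (hc : line.toList[i]? = some c) (hd : pvIsDig c = false)
    (hwd : wd ∈ pvWordsB) (hp : wd.1.toList <+: line.toList.drop i) :
    pvMatchAt line i = some wd.2 := by
  rw [pvMatchAt_of_get hc]
  rw [if_neg (fun hx => absurd ((pvLe_digit c).mp hx) (by simp [hd]))]
  have hnn : pvWordsB.findSome? (fun wd' =>
      if PySem.List.slice line.toList (some (i : Int)) (some ((i : Int) + (wd'.1.toList.length : Int))) = wd'.1.toList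
      then some wd'.2 else none) ≠ none := by
    rw [Ne, List.findSome?_eq_none_iff]
    intro hall
    have := hall wd hwd
    rw [if_pos ((pvSliceTest_iff wd.1.toList).mpr hp)] at this
    exact Option.some_ne_none _ this
  obtain ⟨y, hy⟩ := Option.ne_none_iff_exists'.mp hnn
  obtain ⟨wd', hwd', hf⟩ := List.exists_of_findSome?_eq_some hy
  by_cases ht : PySem.List.slice line.toList (some (i : Int)) (some ((i : Int) + (wd'.1.toList.length : Int))) = wd'.1.toList
  · rw [if_pos ht] at hf
    have hp' : wd'.1.toList <+: line.toList.drop i := (pvSliceTest_iff wd'.1.toList).mp ht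
    have h1 : wd'.1 ∈ pvWordsA := by rw [pvWordsA_eq_mapB]; exact List.mem_map_of_mem hwd'
    have h2 : wd.1 ∈ pvWordsA := by rw [pvWordsA_eq_mapB]; exact List.mem_map_of_mem hwd
    have : wd' = wd := pvWordsB_fst_inj wd' hwd' wd hwd (pvWord_at_uniq h1 h2 hp' hp)
    rw [hy, ← hf, this]
  · rw [if_neg ht] at hf
    exact absurd hf (Option.some_ne_none y).symm

theorem pvMatchAt_none {line : String} {i : Nat} (h : pvHitB line.toList i = false) :
    pvMatchAt line i = none := by
  have hd : pvDigB line.toList i = false := by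
    cases hx : pvDigB line.toList i
    · rfl
    · rw [pvHitB, hx] at h; simp at h
  have hw : pvWordB line.toList i = false := by
    cases hx : pvWordB line.toList i
    · rfl
    · rw [pvHitB, hx] at h; simp at h
  cases hc : line.toList[i]? with
  | none => unfold pvMatchAt; rw [PySem.Str.pyGet?_natCast, hc]
  | some c =>
    have hcd : pvIsDig c = false := by
      cases hx : pvIsDig c
      · rfl
      · exact absurd (pvDigB_iff.mpr ⟨c, hc, hx⟩) (by simp [hd])
    rw [pvMatchAt_of_get hc]
    rw [if_neg (fun hx => absurd ((pvLe_digit c).mp hx) (by simp [hcd]))]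
    rw [List.findSome?_eq_none_iff]
    intro wd hwd
    rw [if_neg]
    intro ht
    have hp : wd.1.toList <+: line.toList.drop i := (pvSliceTest_iff wd.1.toList).mp ht
    have h1 : wd.1 ∈ pvWordsA := by rw [pvWordsA_eq_mapB]; exact List.mem_map_of_mem hwd
    exact absurd (pvWordB_iff.mpr ⟨wd.1, h1, hp⟩) (by simp [hw])

theorem pvMatchAt_isSome {line : String} {i : Nat} (h : pvHitB line.toList i = true) :
    (pvMatchAt line i).isSome = true := by
  rcases Bool.or_eq_true_iff.mp h with h | h
  · obtain ⟨c, hc, hd⟩ := pvDigB_iff.mp h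
    rw [pvMatchAt_dig hc hd]; rfl
  · obtain ⟨w, hw, hp⟩ := pvWordB_iff.mp h
    obtain ⟨wd, hwd, hfst⟩ := by
      rw [pvWordsA_eq_mapB] at hw; exact List.mem_map.mp hw
    have hd : pvDigB line.toList i = false := pvWordB_not_dig h
    obtain ⟨c, hc⟩ : ∃ c, line.toList[i]? = some c := by
      have := pvWordB_lt h
      exact ⟨line.toList[i], List.getElem?_eq_some_iff.mpr ⟨this, rfl⟩⟩
    have hcd : pvIsDig c = false := by
      cases hx : pvIsDig c
      · rfl
      · exact absurd (pvDigB_iff.mpr ⟨c, hc, hx⟩) (by simp [hd])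
    rw [pvMatchAt_word hc hcd hwd (by rw [hfst]; exact hp)]
    rfl

-- B's vals: head and last
theorem pvVals_nil (line : String) (h : ∀ i, pvHitB line.toList i = false) :
    (List.range line.toList.length).filterMap (pvMatchAt line) = [] := by
  rw [List.filterMap_eq_nil_iff]
  intro i _
  exact pvMatchAt_none (h i)

theorem pvVals_head (line : String) {i0 : Nat} (h0 : pvHitB line.toList i0 = true)
    (hmin : ∀ j < i0, pvHitB line.toList j = false) :
    ((List.range line.toList.length).filterMap (pvMatchAt line)).head? = pvMatchAt line i0 := by
  rw [List.head?_filterMap]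
  exact pvFindSome?_first _ _ i0 i0 (List.getElem?_range (pvHitB_lt h0))
    (fun j hj y hy => by
      have : y = j := by
        have hjlt : j < line.toList.length := by
          have := pvHitB_lt h0; omega
        rw [List.getElem?_range hjlt] at hy
        exact (Option.some.injEq _ _).mp hy.symm
      rw [this]
      exact pvMatchAt_none (hmin j hj))
    (pvMatchAt_isSome h0)

theorem pvVals_last (line : String) {i1 : Nat} (h1 : pvHitB line.toList i1 = true)
    (hmax : ∀ j, i1 < j → pvHitB line.toList j = false) :
    ((List.range line.toList.length).filterMap (pvMatchAt line)).getLast? = pvMatchAt line i1 := by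
  have hn := pvHitB_lt h1
  rw [List.getLast?_eq_head?_reverse, ← List.filterMap_reverse, List.head?_filterMap]
  refine pvFindSome?_first _ _ (line.toList.length - 1 - i1) i1 ?_ ?_ (pvMatchAt_isSome h1)
  · rw [List.getElem?_reverse (by rw [List.length_range]; omega)]
    rw [List.length_range]
    rw [List.getElem?_range (by omega)]
    congr 1
    omega
  · intro j hj y hy
    have hjlt : j < line.toList.length := by omega
    rw [List.getElem?_reverse (by rw [List.length_range]; omega), List.length_range,
      List.getElem?_range (by omega)] at hy
    have : y = line.toList.length - 1 - j := (Option.some.injEq _ _).mp hy.symm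
    rw [this]
    exact pvMatchAt_none (hmax _ (by omega))

-- A's dip: empty, head, last
theorem pvGd_nil {line : String} {ch : Char} (h : pvIsDig ch = false) : pvGd line ch = [] := by
  rw [pvGd, if_neg (by simp [h])]

theorem pvDip_nil (line : String) (h : ∀ i, pvDigB line.toList i = false) :
    extract_digit_positions_in_one_line line = [] := by
  rw [pvDip_eq, List.flatMap_eq_nil_iff]
  intro ch hch
  obtain ⟨i, hi⟩ := List.mem_iff_getElem?.mp hch
  refine pvGd_nil ?_
  cases hx : pvIsDig ch
  · rfl
  · exact absurd (pvDigB_iff.mpr ⟨ch, hi, hx⟩) (by simp [h i])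

theorem pvGd_head {line : String} {ch : Char} (h : pvIsDig ch = true) :
    (pvGd line ch).head? = some (PySem.Chars.find line.toList [ch]) := by
  rw [pvGd, if_pos (by simp [h])]
  split <;> rfl

theorem pvGd_last {line : String} {ch : Char} (h : pvIsDig ch = true) :
    (pvGd line ch).getLast? =
      some (PySem.Chars.rfindFrom line.toList [ch] (PySem.Chars.find line.toList [ch])) := by
  rw [pvGd, if_pos (by simp [h])]
  split_ifs with hne
  · rfl
  · rw [not_not] at hne
    rw [← hne]
    rfl

theorem pvDip_ne_nil (line : String) {i : Nat} (h : pvDigB line.toList i = true) :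
    extract_digit_positions_in_one_line line ≠ [] := by
  obtain ⟨c, hc, hd⟩ := pvDigB_iff.mp h
  rw [pvDip_eq, Ne, List.flatMap_eq_nil_iff]
  intro hall
  have h1 := pvGd_head (line := line) hd
  rw [hall c (List.mem_of_getElem? hc)] at h1
  simp at h1

theorem pvDip_head (line : String) {p : Nat} (hp : pvDigB line.toList p = true)
    (hmin : ∀ j < p, pvDigB line.toList j = false) :
    (extract_digit_positions_in_one_line line).head? = some (p : Int) := by
  obtain ⟨c, hc, hd⟩ := pvDigB_iff.mp hp
  rw [pvDip_eq, pvHead?_flatMap]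
  rw [pvFindSome?_first line.toList _ p c hc
    (fun j hj y hy => by
      have hyd : pvIsDig y = false := by
        cases hx : pvIsDig y
        · rfl
        · exact absurd (pvDigB_iff.mpr ⟨y, hy, hx⟩) (by simp [hmin j hj])
      rw [pvGd_nil hyd]; rfl)
    (by rw [pvGd_head hd]; rfl)]
  rw [pvGd_head hd]
  -- find line.toList [c] = p
  obtain ⟨k, hk, hkp, hocc, hminq⟩ := pvFind_spec_nat (pvSingle_prefix.mpr hc)
  have hkeq : k = p := by
    by_contra hne
    have hklt : k < p := by omega
    have : pvDigB line.toList k = true := pvDigB_iff.mpr ⟨c, pvSingle_prefix.mp hocc, hd⟩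
    exact absurd this (by simp [hmin k hklt])
  rw [hk, hkeq]

theorem pvDip_last (line : String) {q : Nat} (hq : pvDigB line.toList q = true)
    (hmax : ∀ j, q < j → pvDigB line.toList j = false) :
    (extract_digit_positions_in_one_line line).getLast? = some (q : Int) := by
  obtain ⟨c, hc, hd⟩ := pvDigB_iff.mp hq
  have hqn : q < line.toList.length := pvDigB_lt hq
  rw [pvDip_eq, pvGetLast?_flatMap]
  rw [pvFindSome?_first line.toList.reverse _ (line.toList.length - 1 - q) c
    (by
      rw [List.getElem?_reverse (by omega)]
      have : line.toList.length - 1 - (line.toList.length - 1 - q) = q := by omega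
      rw [this]; exact hc)
    (fun j hj y hy => by
      rw [List.getElem?_reverse (by omega)] at hy
      have hyd : pvIsDig y = false := by
        cases hx : pvIsDig y
        · rfl
        · have hcontr := pvDigB_iff.mpr ⟨y, hy, hx⟩
          rw [hmax (line.toList.length - 1 - j) (by omega)] at hcontr
          simp at hcontr
      rw [pvGd_nil hyd]; rfl)
    (by rw [pvGd_last hd]; rfl)]
  rw [pvGd_last hd]
  -- rfindFrom = q
  obtain ⟨k, hk, hkp, hocck, hminq⟩ := pvFind_spec_nat (pvSingle_prefix.mpr hc)
  obtain ⟨r, hr, hrk, hoccr, hmaxr⟩ :=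
    pvRfindFrom_spec (by simp) (pvSingle_prefix.mpr hc) hkp
  have hq_le : q ≤ r := by
    by_contra h
    exact (hmaxr q (by omega)) (pvSingle_prefix.mpr hc)
  have hr_le : r ≤ q := by
    by_contra h
    have : pvDigB line.toList r = true := pvDigB_iff.mpr ⟨c, pvSingle_prefix.mp hoccr, hd⟩
    simp [hmax r (by omega)] at this
  have hreq : r = q := by omega
  rw [hk, hr, hreq]

theorem pvIsIn_iff {line w : String} :
    PySem.Str.isIn w line = true ↔ ∃ j : Nat, w.toList <+: line.toList.drop j := by
  rw [show PySem.Str.isIn w line = PySem.Chars.isIn w.toList line.toList from by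
    simp [PySem.Str.isIn]]
  exact (PySem.Chars.exists_prefix_drop_iff_isIn _ _).symm

theorem pvStrFind_eq (line w : String) :
    PySem.Str.find line w = PySem.Chars.find line.toList w.toList := by
  simp [PySem.Str.find]

theorem pvStrRfindFrom_eq (line w : String) (st : Int) :
    PySem.Str.rfindFrom line w st = PySem.Chars.rfindFrom line.toList w.toList st := by
  simp [PySem.Str.rfindFrom]

theorem pvGw_nil {line w : String} (h : PySem.Str.isIn w line = false) : pvGw line w = [] := by
  have h' : PySem.Chars.isIn w.toList line.toList = false := by simpa using h
  rw [pvGw, if_neg (by simp [h'])]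

theorem pvGw_mem_fi {line w : String} (h : PySem.Str.isIn w line = true) :
    (PySem.Str.find line w, pvDigitWordStr w) ∈ pvGw line w := by
  rw [pvGw, if_pos h]
  split_ifs <;> simp

theorem pvGw_mem_li {line w : String} (h : PySem.Str.isIn w line = true) :
    (PySem.Str.rfindFrom line w (PySem.Str.find line w), pvDigitWordStr w) ∈ pvGw line w := by
  rw [pvGw, if_pos h]
  split_ifs with h2
  · simp
  · rw [not_not] at h2
    rw [← h2]
    simp

theorem pvP_nil (line : String) (h : ∀ i, pvWordB line.toList i = false) : pvP line = [] := by
  rw [pvP, List.flatMap_eq_nil_iff]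
  intro w hw
  refine pvGw_nil ?_
  cases hx : PySem.Str.isIn w line
  · rfl
  · obtain ⟨j, hj⟩ := pvIsIn_iff.mp hx
    have := pvWordB_iff.mpr ⟨w, hw, hj⟩
    rw [h j] at this
    simp at this

theorem pvP_ne_nil (line : String) {i : Nat} (h : pvWordB line.toList i = true) :
    pvP line ≠ [] := by
  obtain ⟨w, hw, hp⟩ := pvWordB_iff.mp h
  have hin : PySem.Str.isIn w line = true := pvIsIn_iff.mpr ⟨i, hp⟩
  intro hnil
  rw [pvP, List.flatMap_eq_nil_iff] at hnil
  have h0 := hnil w hw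
  exact absurd (h0 ▸ pvGw_mem_fi hin) List.not_mem_nil

theorem pvP_mem {line : String} {pr : Int × String} (h : pr ∈ pvP line) :
    ∃ w ∈ pvWordsA, ∃ j : Nat, pr.1 = (j : Int) ∧ w.toList <+: line.toList.drop j ∧
      pr.2 = pvDigitWordStr w := by
  rw [pvP, List.mem_flatMap] at h
  obtain ⟨w, hw, hpr⟩ := h
  by_cases hin : PySem.Str.isIn w line = true
  · obtain ⟨p, hp⟩ := pvIsIn_iff.mp hin
    obtain ⟨k, hk, hkp, hocck, -⟩ := pvFind_spec_nat hp
    rw [pvGw, if_pos hin] at hpr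
    have hfi : PySem.Str.find line w = (k : Int) := by rw [pvStrFind_eq]; exact hk
    split_ifs at hpr with h2
    · rcases List.mem_pair.mp hpr with hpr | hpr
      · exact ⟨w, hw, k, by rw [hpr, hfi], hocck, by rw [hpr]⟩
      · obtain ⟨q, hq, hqk, hoccq, -⟩ := pvRfindFrom_spec
          (s := line.toList) (sub := w.toList) (st := k) (p := k)
          (fun hnil => (pvWord_head w hw).1 hnil) hocck (le_refl k)
        refine ⟨w, hw, q, ?_, hoccq, by rw [hpr]⟩
        rw [hpr]
        show PySem.Str.rfindFrom line w (PySem.Str.find line w) = (q : Int)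
        rw [pvStrRfindFrom_eq, pvStrFind_eq, hk]
        exact hq
    · rcases List.mem_singleton.mp hpr with hpr
      exact ⟨w, hw, k, by rw [hpr, hfi], hocck, by rw [hpr]⟩
  · rw [pvGw_nil (by cases hx : PySem.Str.isIn w line; rfl; exact absurd hx hin)] at hpr
    exact absurd hpr List.not_mem_nil

theorem pvP_min (line : String) {m : Nat} (hm : pvWordB line.toList m = true)
    (hmin : ∀ j < m, pvWordB line.toList j = false) :
    PySem.List.min? ((pvP line).map Prod.fst) (fun x => x) = some (m : Int) := by
  obtain ⟨w, hw, hp⟩ := pvWordB_iff.mp hm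
  obtain ⟨k, hk, hkp, hocck, -⟩ := pvFind_spec_nat hp
  have hkm : k = m := by
    by_contra hne
    have := pvWordB_iff.mpr ⟨w, hw, hocck⟩
    rw [hmin k (by omega)] at this
    simp at this
  have hin : PySem.Str.isIn w line = true := pvIsIn_iff.mpr ⟨m, hp⟩
  have hmem : ((m : Int)) ∈ (pvP line).map Prod.fst := by
    refine List.mem_map.mpr ⟨(PySem.Str.find line w, pvDigitWordStr w), ?_, ?_⟩
    · exact List.mem_flatMap.mpr ⟨w, hw, pvGw_mem_fi hin⟩
    · show PySem.Str.find line w = (m : Int)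
      rw [pvStrFind_eq, hk, hkm]
  cases hmv : PySem.List.min? ((pvP line).map Prod.fst) (fun x => x) with
  | none =>
    rw [PySem.List.min?_eq_none_iff] at hmv
    rw [hmv] at hmem
    exact absurd hmem List.not_mem_nil
  | some mv =>
    have hle : mv ≤ (m : Int) := PySem.List.min?_isMin hmv _ hmem
    have hmemv : mv ∈ (pvP line).map Prod.fst := PySem.List.min?_mem hmv
    obtain ⟨pr, hpr, hprv⟩ := List.mem_map.mp hmemv
    obtain ⟨w', hw', j, hj1, hj2, -⟩ := pvP_mem hpr
    have hwb : pvWordB line.toList j = true := pvWordB_iff.mpr ⟨w', hw', hj2⟩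
    have hjm : m ≤ j := by
      by_contra hlt
      rw [hmin j (by omega)] at hwb
      simp at hwb
    have : (m : Int) ≤ mv := by
      rw [← hprv, hj1]
      exact_mod_cast hjm
    have : mv = (m : Int) := by omega
    rw [this]

theorem pvP_max (line : String) {M : Nat} (hM : pvWordB line.toList M = true)
    (hmax : ∀ j, M < j → pvWordB line.toList j = false) :
    PySem.List.max? ((pvP line).map Prod.fst) (fun x => x) = some (M : Int) := by
  obtain ⟨w, hw, hp⟩ := pvWordB_iff.mp hM
  obtain ⟨k, hk, hkp, hocck, -⟩ := pvFind_spec_nat hp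
  obtain ⟨q, hq, hqk, hoccq, hqmax⟩ := pvRfindFrom_spec
    (s := line.toList) (sub := w.toList) (st := k) (p := M)
    (fun hnil => (pvWord_head w hw).1 hnil) hp hkp
  have hqM : q = M := by
    have h1 : q ≤ M := by
      by_contra hgt
      have := pvWordB_iff.mpr ⟨w, hw, hoccq⟩
      rw [hmax q (by omega)] at this
      simp at this
    have h2 : M ≤ q := by
      by_contra hlt
      exact (hqmax M (by omega)) hp
    omega
  have hin : PySem.Str.isIn w line = true := pvIsIn_iff.mpr ⟨M, hp⟩
  have hmem : ((M : Int)) ∈ (pvP line).map Prod.fst := by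
    refine List.mem_map.mpr ⟨(PySem.Str.rfindFrom line w (PySem.Str.find line w), pvDigitWordStr w), ?_, ?_⟩
    · exact List.mem_flatMap.mpr ⟨w, hw, pvGw_mem_li hin⟩
    · show PySem.Str.rfindFrom line w (PySem.Str.find line w) = (M : Int)
      rw [pvStrRfindFrom_eq, pvStrFind_eq, hk, hq, hqM]
  cases hmv : PySem.List.max? ((pvP line).map Prod.fst) (fun x => x) with
  | none =>
    rw [PySem.List.max?_eq_none_iff] at hmv
    rw [hmv] at hmem
    exact absurd hmem List.not_mem_nil
  | some mv =>
    have hle : (M : Int) ≤ mv := PySem.List.max?_isMax hmv _ hmem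
    have hmemv : mv ∈ (pvP line).map Prod.fst := PySem.List.max?_mem hmv
    obtain ⟨pr, hpr, hprv⟩ := List.mem_map.mp hmemv
    obtain ⟨w', hw', j, hj1, hj2, -⟩ := pvP_mem hpr
    have hwb : pvWordB line.toList j = true := pvWordB_iff.mpr ⟨w', hw', hj2⟩
    have hjm : j ≤ M := by
      by_contra hlt
      rw [hmax j (by omega)] at hwb
      simp at hwb
    have : mv ≤ (M : Int) := by
      rw [← hprv, hj1]
      exact_mod_cast hjm
    have : mv = (M : Int) := by omega
    rw [this]

theorem pvSel (P : List (Int × String)) (m : Int) (hm : ∃ pr ∈ P, pr.1 = m) :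
    ∃ pr ∈ P, pr.1 = m ∧
      (PySem.List.pyGet? (P.map Prod.snd)
        (((PySem.List.index? (P.map Prod.fst) m).getD 0 : Nat) : Int)).getD "" = pr.2 := by
  induction P with
  | nil => obtain ⟨pr, hpr, -⟩ := hm; exact absurd hpr List.not_mem_nil
  | cons a t ih =>
    by_cases ha : a.1 = m
    · refine ⟨a, List.mem_cons_self, ha, ?_⟩
      rw [List.map_cons, List.map_cons, ha, PySem.List.index?_cons_self]
      simp [PySem.List.pyGet?_of_nonneg]
    · obtain ⟨pr, hpr, hpm⟩ := hm
      have hprt : pr ∈ t := by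
        rcases List.mem_cons.mp hpr with h | h
        · rw [h] at hpm; exact absurd hpm ha
        · exact h
      obtain ⟨pr', hpr', hpm', hval⟩ := ih ⟨pr, hprt, hpm⟩
      refine ⟨pr', List.mem_cons_of_mem a hpr', hpm', ?_⟩
      rw [List.map_cons, List.map_cons, PySem.List.index?_cons_of_ne _ ha]
      have hsome : (PySem.List.index? (t.map Prod.fst) m).isSome = true :=
        (PySem.List.index?_isSome_iff _ _).mpr (List.mem_map.mpr ⟨pr, hprt, hpm⟩)
      obtain ⟨k, hk⟩ := Option.isSome_iff_exists.mp hsome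
      rw [hk] at hval ⊢
      simp only [Option.map_some, Option.getD_some] at hval ⊢
      rw [PySem.List.pyGet?_of_nonneg _ (by omega)] at hval ⊢
      simp only [Int.toNat_natCast] at hval ⊢
      rw [List.getElem?_cons_succ]
      exact hval

theorem pvHitB_or {s : List Char} {i : Nat} :
    pvHitB s i = true ↔ pvDigB s i = true ∨ pvWordB s i = true := by
  rw [pvHitB]; exact Bool.or_eq_true_iff

theorem pvPyGet_head {xs : List Int} {v : Int} (h : xs.head? = some v) :
    (PySem.List.pyGet? xs 0).getD 0 = v := by
  rw [PySem.List.pyGet?_of_nonneg _ (by omega)]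
  simp only [Int.toNat_zero]
  rw [← List.head?_eq_getElem?, h]
  rfl

theorem pvPyGet_last {xs : List Int} {v : Int} (h : xs.getLast? = some v) :
    (PySem.List.pyGet? xs ((xs.length : Int) - 1)).getD 0 = v := by
  have hne : xs ≠ [] := by intro h0; rw [h0] at h; cases h
  have hlen : 1 ≤ xs.length := List.length_pos_of_ne_nil hne
  rw [PySem.List.pyGet?_of_nonneg _ (by omega)]
  have ht : ((xs.length : Int) - 1).toNat = xs.length - 1 := by omega
  rw [ht]
  rw [List.getLast?_eq_getElem?] at h
  rw [h]
  rfl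

theorem pvCombine {fd sd : String} {a b : Char} {v0 v1 : Int}
    (hfd : fd.toList = [a]) (hsd : sd.toList = [b])
    (ha : pvIsDig a = true) (hb : pvIsDig b = true)
    (hva : (a.toNat : Int) - 48 = v0) (hvb : (b.toNat : Int) - 48 = v1) :
    (PySem.Int.ofChars? (fd.toList ++ sd.toList)).getD 0 = 10 * v0 + v1 := by
  rw [hfd, hsd]
  show (PySem.Int.ofChars? [a, b]).getD 0 = _
  rw [pvOfChars_two ha hb]
  rw [Option.getD_some, hva, hvb]

-- the value B computes at a word-hit position, tied to A's selected pair
theorem pvWordSel {line : String} {m : Nat} {vm : Int} (hmW : pvWordB line.toList m = true)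
    (hval : pvMatchAt line m = some vm) :
    ∀ pr ∈ pvP line, pr.1 = (m : Int) →
      ∃ a, pr.2.toList = [a] ∧ pvIsDig a = true ∧ (a.toNat : Int) - 48 = vm := by
  intro pr hpr hpr1
  obtain ⟨w', hw', j, hj1, hj2, hj3⟩ := pvP_mem hpr
  have hjm : j = m := by
    rw [hj1] at hpr1; exact_mod_cast hpr1
  subst hjm
  obtain ⟨wd, hwd, hfst⟩ := by
    rw [pvWordsA_eq_mapB] at hw'; exact List.mem_map.mp hw'
  have hdig : pvDigB line.toList j = false := pvWordB_not_dig hmW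
  obtain ⟨c, hc⟩ : ∃ c, line.toList[j]? = some c := by
    have := pvWordB_lt hmW
    exact ⟨line.toList[j], List.getElem?_eq_some_iff.mpr ⟨this, rfl⟩⟩
  have hcd : pvIsDig c = false := by
    cases hx : pvIsDig c
    · rfl
    · exact absurd (pvDigB_iff.mpr ⟨c, hc, hx⟩) (by simp [hdig])
  have hmA : pvMatchAt line j = some wd.2 :=
    pvMatchAt_word hc hcd hwd (by rw [hfst]; exact hj2)
  have hvm : wd.2 = vm := by
    rw [hmA] at hval
    exact (Option.some.injEq _ _).mp hval
  obtain ⟨h1, h2, h3⟩ := pvWordstr_spec wd hwd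
  refine ⟨Char.ofNat (48 + wd.2.toNat), ?_, h2, by rw [h3]; exact hvm⟩
  rw [hj3, ← hfst, h1]

theorem pvDigB_hit {s : List Char} {i : Nat} (h : pvDigB s i = true) : pvHitB s i = true :=
  pvHitB_or.mpr (Or.inl h)

theorem pvWordB_hit {s : List Char} {i : Nat} (h : pvWordB s i = true) : pvHitB s i = true :=
  pvHitB_or.mpr (Or.inr h)

theorem pvLineValue_eq (line : String) {v0 v1 : Int} {i0 i1 : Nat}
    (h0 : pvHitB line.toList i0 = true) (h0min : ∀ j < i0, pvHitB line.toList j = false)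
    (h1 : pvHitB line.toList i1 = true) (h1max : ∀ j, i1 < j → pvHitB line.toList j = false)
    (hv0 : pvMatchAt line i0 = some v0) (hv1 : pvMatchAt line i1 = some v1) :
    pvLineValue line = 10 * v0 + v1 := by
  have hhead := pvVals_head line h0 h0min
  have hlast := pvVals_last line h1 h1max
  unfold pvLineValue
  cases hvals : (List.range line.toList.length).filterMap (pvMatchAt line) with
  | nil =>
    rw [hvals] at hhead
    rw [hv0] at hhead
    cases hhead
  | cons v rest =>
    rw [hvals] at hhead hlast
    rw [hv0] at hhead
    rw [hv1, List.getLast?_cons] at hlast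
    simp only [List.head?_cons, Option.some.injEq] at hhead hlast
    simp only []
    rw [← hhead]
    rw [List.getLastD_eq_getLast?, ← hlast]

theorem pvLineValue_zero (line : String) (h : ∀ i, pvHitB line.toList i = false) :
    pvLineValue line = 0 := by
  unfold pvLineValue
  rw [pvVals_nil line h]

theorem pvLine_eq (line : String) : pvLineA line = pvLineValue line := by
  by_cases hex : ∃ i, pvHitB line.toList i = true
  · have hi0 := Nat.find_spec hex
    have hi0min : ∀ j < Nat.find hex, pvHitB line.toList j = false := fun j hj => by
      cases h : pvHitB line.toList j
      · rfl
      · exact absurd h (Nat.find_min hex hj)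
    have hi1 : pvHitB line.toList
        (Nat.findGreatest (fun i => pvHitB line.toList i = true) line.toList.length) = true :=
      Nat.findGreatest_spec (P := fun i => pvHitB line.toList i = true) (le_of_lt (pvHitB_lt hi0)) hi0
    have hi1max : ∀ j,
        Nat.findGreatest (fun i => pvHitB line.toList i = true) line.toList.length < j →
        pvHitB line.toList j = false := fun j hj => by
      cases h : pvHitB line.toList j
      · rfl
      · rcases Nat.lt_or_ge j (line.toList.length + 1) with hle | hgt
        · exact absurd h (Nat.findGreatest_is_greatest hj (by omega))
        · have := pvHitB_lt h; omega
    obtain ⟨v0, hv0⟩ := Option.isSome_iff_exists.mp (pvMatchAt_isSome hi0)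
    obtain ⟨v1, hv1⟩ := Option.isSome_iff_exists.mp (pvMatchAt_isSome hi1)
    rw [pvLineValue_eq line hi0 hi0min hi1 hi1max hv0 hv1]
    by_cases hd : ∃ i, pvDigB line.toList i = true
    · -- digits exist
      have hp := Nat.find_spec hd
      have hpmin : ∀ j < Nat.find hd, pvDigB line.toList j = false := fun j hj => by
        cases h : pvDigB line.toList j
        · rfl
        · exact absurd h (Nat.find_min hd hj)
      have hq : pvDigB line.toList
          (Nat.findGreatest (fun i => pvDigB line.toList i = true) line.toList.length) = true :=
        Nat.findGreatest_spec (P := fun i => pvDigB line.toList i = true) (le_of_lt (pvDigB_lt hp)) hp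
      have hqmax : ∀ j,
          Nat.findGreatest (fun i => pvDigB line.toList i = true) line.toList.length < j →
          pvDigB line.toList j = false := fun j hj => by
        cases h : pvDigB line.toList j
        · rfl
        · rcases Nat.lt_or_ge j (line.toList.length + 1) with hle | hgt
          · exact absurd h (Nat.findGreatest_is_greatest hj (by omega))
          · have := pvDigB_lt h; omega
      have hdiphead := pvDip_head line hp hpmin
      have hdiplast := pvDip_last line hq hqmax
      have hdipne := pvDip_ne_nil line hp
      have hdip0 := pvPyGet_head hdiphead
      have hdipL := pvPyGet_last hdiplast
      have hi0le_p : Nat.find hex ≤ Nat.find hd := Nat.find_min' hex (pvDigB_hit hp)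
      have hq_le_i1 : Nat.findGreatest (fun i => pvDigB line.toList i = true) line.toList.length ≤
          Nat.findGreatest (fun i => pvHitB line.toList i = true) line.toList.length :=
        Nat.le_findGreatest (P := fun i => pvHitB line.toList i = true) (le_of_lt (pvDigB_lt hq)) (pvDigB_hit hq)
      by_cases hw : ∃ i, pvWordB line.toList i = true
      · -- both digits and words: A's first branch
        have hmw := Nat.find_spec hw
        have hmwmin : ∀ j < Nat.find hw, pvWordB line.toList j = false := fun j hj => by
          cases h : pvWordB line.toList j
          · rfl
          · exact absurd h (Nat.find_min hw hj)
        have hMW : pvWordB line.toList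
            (Nat.findGreatest (fun i => pvWordB line.toList i = true) line.toList.length) = true :=
          Nat.findGreatest_spec (P := fun i => pvWordB line.toList i = true) (le_of_lt (pvWordB_lt hmw)) hmw
        have hMWmax : ∀ j,
            Nat.findGreatest (fun i => pvWordB line.toList i = true) line.toList.length < j →
            pvWordB line.toList j = false := fun j hj => by
          cases h : pvWordB line.toList j
          · rfl
          · rcases Nat.lt_or_ge j (line.toList.length + 1) with hle | hgt
            · exact absurd h (Nat.findGreatest_is_greatest hj (by omega))
            · have := pvWordB_lt h; omega
        have hminv := pvP_min line hmw hmwmin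
        have hmaxv := pvP_max line hMW hMWmax
        have hPne := pvP_ne_nil line hmw
        have hi0le_w : Nat.find hex ≤ Nat.find hw := Nat.find_min' hex (pvWordB_hit hmw)
        have hMW_le_i1 : Nat.findGreatest (fun i => pvWordB line.toList i = true) line.toList.length ≤
            Nat.findGreatest (fun i => pvHitB line.toList i = true) line.toList.length :=
          Nat.le_findGreatest (P := fun i => pvHitB line.toList i = true) (le_of_lt (pvWordB_lt hMW)) (pvWordB_hit hMW)
        have hpmW : Nat.find hd ≠ Nat.find hw := fun heq => by
          have hx := pvWordB_not_dig hmw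
          rw [← heq] at hx
          rw [hp] at hx
          cases hx
        have hqMW : Nat.findGreatest (fun i => pvDigB line.toList i = true) line.toList.length ≠
            Nat.findGreatest (fun i => pvWordB line.toList i = true) line.toList.length := fun heq => by
          have hx := pvWordB_not_dig hMW
          rw [← heq] at hx
          rw [hq] at hx
          cases hx
        unfold pvLineA
        rw [pvDsp_eq]
        simp only []
        rw [if_pos ⟨List.length_pos_of_ne_nil hdipne,
          by rw [List.length_map]; exact List.length_pos_of_ne_nil hPne⟩]
        rw [hdip0, hdipL, hminv, hmaxv]
        simp only [Option.getD_some]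
        -- first digit
        have hfd : ∃ a : Char, (if ((Nat.find hd : Nat) : Int) > ((Nat.find hw : Nat) : Int) then
              (PySem.List.pyGet? ((pvP line).map Prod.snd)
                (((PySem.List.index? ((pvP line).map Prod.fst) ((Nat.find hw : Nat) : Int)).getD 0 : Nat) : Int)).getD ""
            else
              String.ofList [(PySem.Str.pyGet? line ((Nat.find hd : Nat) : Int)).getD ' ']).toList = [a] ∧
            pvIsDig a = true ∧ (a.toNat : Int) - 48 = v0 := by
          by_cases hcmp : Nat.find hd < Nat.find hw
          · -- first hit is the digit
            have hi0p : Nat.find hex = Nat.find hd := by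
              rcases pvHitB_or.mp hi0 with h | h
              · have := Nat.find_min' hd h; omega
              · have := Nat.find_min' hw h; omega
            rw [if_neg (by exact_mod_cast by omega)]
            obtain ⟨c, hc, hcd⟩ := pvDigB_iff.mp hp
            refine ⟨c, ?_, hcd, ?_⟩
            · rw [PySem.Str.pyGet?_natCast, hc]
              simp [String.toList_ofList]
            · rw [hi0p, pvMatchAt_dig hc hcd] at hv0
              exact (Option.some.injEq _ _).mp hv0
          · -- first hit is the word
            have hwp : Nat.find hw < Nat.find hd := by omega
            have hi0w : Nat.find hex = Nat.find hw := by
              rcases pvHitB_or.mp hi0 with h | h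
              · have := Nat.find_min' hd h; omega
              · have := Nat.find_min' hw h; omega
            rw [if_pos (by exact_mod_cast hwp)]
            obtain ⟨pr, hpr, hpr1⟩ := List.mem_map.mp (PySem.List.min?_mem hminv)
            obtain ⟨pr', hpr', hpr1', hval⟩ := pvSel (pvP line) _ ⟨pr, hpr, hpr1⟩
            rw [hval]
            exact pvWordSel hmw (by rw [← hi0w]; exact hv0) pr' hpr' hpr1'
        -- second digit
        have hsd : ∃ b : Char, (if ((Nat.findGreatest (fun i => pvDigB line.toList i = true) line.toList.length : Nat) : Int) <
              ((Nat.findGreatest (fun i => pvWordB line.toList i = true) line.toList.length : Nat) : Int) then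
              (PySem.List.pyGet? ((pvP line).map Prod.snd)
                (((PySem.List.index? ((pvP line).map Prod.fst)
                  ((Nat.findGreatest (fun i => pvWordB line.toList i = true) line.toList.length : Nat) : Int)).getD 0 : Nat) : Int)).getD ""
            else
              String.ofList [(PySem.Str.pyGet? line
                ((Nat.findGreatest (fun i => pvDigB line.toList i = true) line.toList.length : Nat) : Int)).getD ' ']).toList = [b] ∧
            pvIsDig b = true ∧ (b.toNat : Int) - 48 = v1 := by
          by_cases hcmp : Nat.findGreatest (fun i => pvDigB line.toList i = true) line.toList.length <
              Nat.findGreatest (fun i => pvWordB line.toList i = true) line.toList.length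
          · -- last hit is the word
            have hi1w : Nat.findGreatest (fun i => pvHitB line.toList i = true) line.toList.length =
                Nat.findGreatest (fun i => pvWordB line.toList i = true) line.toList.length := by
              rcases pvHitB_or.mp hi1 with h | h
              · have : Nat.findGreatest (fun i => pvHitB line.toList i = true) line.toList.length ≤
                    Nat.findGreatest (fun i => pvDigB line.toList i = true) line.toList.length := by
                  by_contra hc
                  rw [hqmax _ (by omega)] at h
                  cases h
                omega
              · have : Nat.findGreatest (fun i => pvHitB line.toList i = true) line.toList.length ≤
                    Nat.findGreatest (fun i => pvWordB line.toList i = true) line.toList.length := by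
                  by_contra hc
                  rw [hMWmax _ (by omega)] at h
                  cases h
                omega
            rw [if_pos (by exact_mod_cast hcmp)]
            obtain ⟨pr, hpr, hpr1⟩ := List.mem_map.mp (PySem.List.max?_mem hmaxv)
            obtain ⟨pr', hpr', hpr1', hval⟩ := pvSel (pvP line) _ ⟨pr, hpr, hpr1⟩
            rw [hval]
            exact pvWordSel hMW (by rw [← hi1w]; exact hv1) pr' hpr' hpr1'
          · -- last hit is the digit
            have hqgt : Nat.findGreatest (fun i => pvWordB line.toList i = true) line.toList.length <
                Nat.findGreatest (fun i => pvDigB line.toList i = true) line.toList.length := by omega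
            have hi1q : Nat.findGreatest (fun i => pvHitB line.toList i = true) line.toList.length =
                Nat.findGreatest (fun i => pvDigB line.toList i = true) line.toList.length := by
              rcases pvHitB_or.mp hi1 with h | h
              · have : Nat.findGreatest (fun i => pvHitB line.toList i = true) line.toList.length ≤
                    Nat.findGreatest (fun i => pvDigB line.toList i = true) line.toList.length := by
                  by_contra hc
                  rw [hqmax _ (by omega)] at h
                  cases h
                omega
              · have : Nat.findGreatest (fun i => pvHitB line.toList i = true) line.toList.length ≤
                    Nat.findGreatest (fun i => pvWordB line.toList i = true) line.toList.length := by
                  by_contra hc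
                  rw [hMWmax _ (by omega)] at h
                  cases h
                omega
            rw [if_neg (by exact_mod_cast by omega)]
            obtain ⟨c, hc, hcd⟩ := pvDigB_iff.mp hq
            refine ⟨c, ?_, hcd, ?_⟩
            · rw [PySem.Str.pyGet?_natCast, hc]
              simp [String.toList_ofList]
            · rw [hi1q, pvMatchAt_dig hc hcd] at hv1
              exact (Option.some.injEq _ _).mp hv1
        obtain ⟨a, hfa, hda, hvala⟩ := hfd
        obtain ⟨b, hfb, hdb, hvalb⟩ := hsd
        exact pvCombine hfa hfb hda hdb hvala hvalb
      · -- digits only: A's third branch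
        have hwall : ∀ i, pvWordB line.toList i = false := fun i => by
          cases h : pvWordB line.toList i
          · rfl
          · exact absurd ⟨i, h⟩ hw
        have hP := pvP_nil line hwall
        have hi0p : Nat.find hex = Nat.find hd := by
          rcases pvHitB_or.mp hi0 with h | h
          · have := Nat.find_min' hd h; omega
          · rw [hwall _] at h; cases h
        have hi1q : Nat.findGreatest (fun i => pvHitB line.toList i = true) line.toList.length =
            Nat.findGreatest (fun i => pvDigB line.toList i = true) line.toList.length := by
          rcases pvHitB_or.mp hi1 with h | h
          · have : Nat.findGreatest (fun i => pvHitB line.toList i = true) line.toList.length ≤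
                Nat.findGreatest (fun i => pvDigB line.toList i = true) line.toList.length := by
              by_contra hc
              rw [hqmax _ (by omega)] at h
              cases h
            omega
          · rw [hwall _] at h; cases h
        unfold pvLineA
        rw [pvDsp_eq, hP]
        simp only [List.map_nil, List.length_nil]
        rw [if_neg (by intro hcon; omega)]
        rw [if_neg (by
          intro hcon
          have := List.length_pos_of_ne_nil hdipne
          omega)]
        rw [if_pos ⟨trivial, List.length_pos_of_ne_nil hdipne⟩]
        rw [hdip0, hdipL]
        obtain ⟨c, hc, hcd⟩ := pvDigB_iff.mp hp
        obtain ⟨c', hc', hcd'⟩ := pvDigB_iff.mp hq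
        refine pvCombine (a := c) (b := c') ?_ ?_ hcd hcd' ?_ ?_
        · rw [PySem.Str.pyGet?_natCast, hc]
          simp [String.toList_ofList]
        · rw [PySem.Str.pyGet?_natCast, hc']
          simp [String.toList_ofList]
        · rw [hi0p, pvMatchAt_dig hc hcd] at hv0
          exact (Option.some.injEq _ _).mp hv0
        · rw [hi1q, pvMatchAt_dig hc' hcd'] at hv1
          exact (Option.some.injEq _ _).mp hv1
    · -- no digits: words must exist: A's second branch
      have hdall : ∀ i, pvDigB line.toList i = false := fun i => by
        cases h : pvDigB line.toList i
        · rfl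
        · exact absurd ⟨i, h⟩ hd
      have hw : ∃ i, pvWordB line.toList i = true := by
        rcases pvHitB_or.mp hi0 with h | h
        · rw [hdall _] at h; cases h
        · exact ⟨_, h⟩
      have hmw := Nat.find_spec hw
      have hmwmin : ∀ j < Nat.find hw, pvWordB line.toList j = false := fun j hj => by
        cases h : pvWordB line.toList j
        · rfl
        · exact absurd h (Nat.find_min hw hj)
      have hMW : pvWordB line.toList
          (Nat.findGreatest (fun i => pvWordB line.toList i = true) line.toList.length) = true :=
        Nat.findGreatest_spec (P := fun i => pvWordB line.toList i = true) (le_of_lt (pvWordB_lt hmw)) hmw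
      have hMWmax : ∀ j,
          Nat.findGreatest (fun i => pvWordB line.toList i = true) line.toList.length < j →
          pvWordB line.toList j = false := fun j hj => by
        cases h : pvWordB line.toList j
        · rfl
        · rcases Nat.lt_or_ge j (line.toList.length + 1) with hle | hgt
          · exact absurd h (Nat.findGreatest_is_greatest hj (by omega))
          · have := pvWordB_lt h; omega
      have hminv := pvP_min line hmw hmwmin
      have hmaxv := pvP_max line hMW hMWmax
      have hPne := pvP_ne_nil line hmw
      have hdip := pvDip_nil line hdall
      have hi0w : Nat.find hex = Nat.find hw := by
        rcases pvHitB_or.mp hi0 with h | h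
        · rw [hdall _] at h; cases h
        · have h1 := Nat.find_min' hw h
          have h2 := Nat.find_min' hex (pvWordB_hit hmw)
          omega
      have hi1w : Nat.findGreatest (fun i => pvHitB line.toList i = true) line.toList.length =
          Nat.findGreatest (fun i => pvWordB line.toList i = true) line.toList.length := by
        rcases pvHitB_or.mp hi1 with h | h
        · rw [hdall _] at h; cases h
        · have h1 : Nat.findGreatest (fun i => pvHitB line.toList i = true) line.toList.length ≤
              Nat.findGreatest (fun i => pvWordB line.toList i = true) line.toList.length := by
            by_contra hc
            rw [hMWmax _ (by omega)] at h
            cases h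
          have h2 : Nat.findGreatest (fun i => pvWordB line.toList i = true) line.toList.length ≤
              Nat.findGreatest (fun i => pvHitB line.toList i = true) line.toList.length :=
            Nat.le_findGreatest (P := fun i => pvHitB line.toList i = true) (le_of_lt (pvWordB_lt hMW)) (pvWordB_hit hMW)
          omega
      unfold pvLineA
      rw [pvDsp_eq, hdip]
      simp only [List.length_nil]
      rw [if_neg (by intro hcon; omega)]
      rw [if_pos ⟨trivial, by rw [List.length_map]; exact List.length_pos_of_ne_nil hPne⟩]
      rw [hminv, hmaxv]
      simp only [Option.getD_some]
      obtain ⟨pra, hpra, hpra1⟩ := List.mem_map.mp (PySem.List.min?_mem hminv)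
      obtain ⟨pra', hpra', hpra1', hvala⟩ := pvSel (pvP line) _ ⟨pra, hpra, hpra1⟩
      obtain ⟨prb, hprb, hprb1⟩ := List.mem_map.mp (PySem.List.max?_mem hmaxv)
      obtain ⟨prb', hprb', hprb1', hvalb⟩ := pvSel (pvP line) _ ⟨prb, hprb, hprb1⟩
      rw [hvala, hvalb]
      obtain ⟨a, hfa, hda, hva⟩ := pvWordSel hmw (by rw [← hi0w]; exact hv0) pra' hpra' hpra1'
      obtain ⟨b, hfb, hdb, hvb⟩ := pvWordSel hMW (by rw [← hi1w]; exact hv1) prb' hprb' hprb1'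
      exact pvCombine hfa hfb hda hdb hva hvb
  · -- no hits at all: both sides 0
    have hall : ∀ i, pvHitB line.toList i = false := fun i => by
      cases h : pvHitB line.toList i
      · rfl
      · exact absurd ⟨i, h⟩ hex
    rw [pvLineValue_zero line hall]
    have hdip : extract_digit_positions_in_one_line line = [] :=
      pvDip_nil line (fun i => by
        cases h : pvDigB line.toList i
        · rfl
        · have := pvDigB_hit h; rw [hall i] at this; cases this)
    have hP : pvP line = [] := pvP_nil line (fun i => by
        cases h : pvWordB line.toList i
        · rfl
        · have := pvWordB_hit h; rw [hall i] at this; cases this)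
    unfold pvLineA
    rw [pvDsp_eq, hdip, hP]
    simp

-- ===== VERDICT (by name: the statement is the Claim_ definition above) =====
theorem get_numbers_list_spec : Claim_equal_get_numbers_list := by
  intro lines_list _
  unfold Spec_get_numbers_list get_numbers_list get_numbers_list_alt
  rw [PySem.List.foldl_append_singleton_eq_map]
  simp [pvLine_eq]
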